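-- pv_equiv track=rewrite | github.com/wongwaituck/advent-of-code-2020 | 6/solve.py | challenge2
-- ===== SOURCE A (Python) =====
-- def challenge2(l: list[str]) -> list[set[str]]:
--     i = 0
--     sz_l = len(l)
--     out = []
--     while i < sz_l:
--         current_group: set[str] = set([chr(c + ord('a')) for c in range(26)])
--         while i < sz_l and len(l[i]) != 0:
--             chars = set([c for c in l[i]])
--             current_group = current_group.intersection(chars)
--             i += 1
--         out.append(current_group)
--         i += 1
--     return out
-- ===== SOURCE B (Python) =====
-- def _group_intersection(group):
--     acc = set(chr(c + ord('a')) for c in range(26))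
--     for line in group:
--         acc = acc & set(line)
--     return acc
--
--
-- def challenge2(l: list[str]) -> list[set[str]]:
--     # Pass 1: partition the lines into groups (blank line ends a group;
--     # a trailing non-empty current group is kept, an empty one is not).
--     groups = []
--     current = []
--     for line in l:
--         if len(line) == 0:
--             groups.append(current)
--             current = []
--         else:
--             current.append(line)
--     if current:
--         groups.append(current)
--     # Pass 2: map each group to the intersection of its lines' letter sets.
--     return [_group_intersection(g) for g in groups]
-- ===== Notes on version B (the rewrite author's own statement) =====
-- stated objective: alternative
-- what changed: A interleaves grouping and set intersection in one index-driven nested while loop; B first partitions the lines into groups in a single pass, then maps each group to a fold of set intersections starting from the full alphabet.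
import Mathlib
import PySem

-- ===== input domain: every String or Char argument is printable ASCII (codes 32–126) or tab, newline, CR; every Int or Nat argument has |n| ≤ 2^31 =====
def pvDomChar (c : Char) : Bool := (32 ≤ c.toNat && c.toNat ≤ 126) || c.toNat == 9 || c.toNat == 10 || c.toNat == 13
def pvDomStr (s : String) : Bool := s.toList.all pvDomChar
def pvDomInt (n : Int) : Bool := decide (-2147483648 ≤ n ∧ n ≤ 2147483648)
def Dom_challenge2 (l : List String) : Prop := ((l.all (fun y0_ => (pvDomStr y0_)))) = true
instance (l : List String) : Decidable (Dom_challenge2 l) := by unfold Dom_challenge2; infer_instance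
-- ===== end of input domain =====

-- B restructures A's single interleaved nested-while loop into a partition pass followed by a map of
-- intersection folds (same values, same cost; objective: alternative decomposition).

-- ===== PORT A =====
-- set([chr(c + ord('a')) for c in range(26)])
def pvAlphabet : PySem.Set String :=
  PySem.Set.ofList ((PySem.List.pyRange 0 26 1).map (fun c => String.ofList [Char.ofNat (c.toNat + 97)]))

-- set([c for c in s]) — iterating a Python str yields its 1-character strings
def pvCharSet (s : String) : PySem.Set String :=
  PySem.Set.ofList (s.toList.map (fun c => String.ofList [c]))

-- inner 'while i < sz_l and len(l[i]) != 0' loop: consumes the nonblank prefix,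
-- intersecting current_group with each line's character set; returns (current_group, remaining lines)
def pvInnerA : List String → PySem.Set String → PySem.Set String × List String
  | [], cg => (cg, [])
  | s :: rest, cg =>
    if PySem.Str.len s ≠ 0 then pvInnerA rest (PySem.Set.inter cg (pvCharSet s))
    else (cg, s :: rest)

theorem pvInnerA_snd_le (l : List String) (cg : PySem.Set String) :
    (pvInnerA l cg).2.length ≤ l.length := by
  induction l generalizing cg with
  | nil => simp [pvInnerA]
  | cons s rest ih =>
    simp only [pvInnerA]
    split
    · exact le_trans (ih _) (by simp)
    · simp

-- outer 'while i < sz_l' loop (i += 1 after the append is the 'drop 1')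
def pvOuterA : List String → List (PySem.Set String)
  | [] => []
  | s :: t =>
    let p := pvInnerA (s :: t) pvAlphabet
    p.1 :: pvOuterA (p.2.drop 1)
termination_by l => l.length
decreasing_by
  have h := pvInnerA_snd_le (s :: t) pvAlphabet
  simp only [List.length_drop, List.length_cons] at *
  omega

def challenge2 (l : List String) : List (List String) := pvOuterA l

-- ===== PORT B =====
-- pass-1 loop body: blank line closes the current group, otherwise the line joins it
def pvGroupStep (st : List (List String) × List String) (s : String) :
    List (List String) × List String :=
  if PySem.Str.len s = 0 then (st.1 ++ [st.2], []) else (st.1, st.2 ++ [s])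

-- _group_intersection
def pvGroupIsect (g : List String) : PySem.Set String :=
  g.foldl (fun acc line => PySem.Set.inter acc (pvCharSet line)) pvAlphabet

def challenge2_alt (l : List String) : List (List String) :=
  let st := l.foldl pvGroupStep ([], [])
  let groups := if st.2 ≠ [] then st.1 ++ [st.2] else st.1
  groups.map pvGroupIsect

-- ===== PRECONDITION & SPEC =====
def Spec_challenge2 (l : List String) (out : List (List String)) : Prop := out = challenge2_alt l
instance (l : List String) (out : List (List String)) : Decidable (Spec_challenge2 l out) := by unfold Spec_challenge2; infer_instance

-- ===== CLAIM (what is proved, stated in full; the proofs are below) =====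
def Claim_equal_challenge2 : Prop := ∀ (l : List String), Dom_challenge2 l → Spec_challenge2 l (challenge2 l)

-- ===== LEMMAS AND PROOFS =====

-- recursive description of B's pass-1 grouping
def pvGroupsC (cur : List String) : List String → List (List String)
  | [] => if cur ≠ [] then [cur] else []
  | s :: rest =>
    if PySem.Str.len s = 0 then cur :: pvGroupsC [] rest else pvGroupsC (cur ++ [s]) rest

theorem pvFoldl_groupStep (l : List String) (acc : List (List String)) (cur : List String) :
    (let st := l.foldl pvGroupStep (acc, cur)
     if st.2 ≠ [] then st.1 ++ [st.2] else st.1) = acc ++ pvGroupsC cur l := by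
  induction l generalizing acc cur with
  | nil =>
    simp only [List.foldl_nil, pvGroupsC]
    split <;> simp_all
  | cons s rest ih =>
    simp only [List.foldl_cons, pvGroupStep, pvGroupsC]
    split
    · rw [ih]; simp
    · rw [ih]

theorem pvInnerA_eq (l : List String) (cg : PySem.Set String) :
    pvInnerA l cg
      = ((l.takeWhile (fun s => PySem.Str.len s ≠ 0)).foldl
            (fun acc line => PySem.Set.inter acc (pvCharSet line)) cg,
         l.dropWhile (fun s => PySem.Str.len s ≠ 0)) := by
  induction l generalizing cg with
  | nil => simp [pvInnerA]
  | cons s rest ih =>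
    simp only [pvInnerA, List.takeWhile, List.dropWhile]
    by_cases h : s = ""
    · simp [h]
    · simp [h, ih]

theorem pvGroupsC_split (l : List String) (cur : List String) (h : l ≠ [] ∨ cur ≠ []) :
    pvGroupsC cur l
      = (cur ++ l.takeWhile (fun s => PySem.Str.len s ≠ 0))
          :: pvGroupsC [] ((l.dropWhile (fun s => PySem.Str.len s ≠ 0)).drop 1) := by
  induction l generalizing cur with
  | nil =>
    rcases h with h | h
    · exact absurd rfl h
    · simp [pvGroupsC, h]
  | cons s rest ih =>
    simp only [pvGroupsC, List.takeWhile, List.dropWhile]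
    by_cases hs : s = ""
    · simp [hs]
    · have h2 := ih (cur ++ [s]) (Or.inr (by simp))
      simp [hs] at h2 ⊢
      simp [h2]

theorem pvOuterA_eq (l : List String) : pvOuterA l = (pvGroupsC [] l).map pvGroupIsect := by
  induction hn : l.length using Nat.strong_induction_on generalizing l with
  | _ n ih =>
    cases l with
    | nil => simp [pvOuterA, pvGroupsC]
    | cons s t =>
      rw [pvOuterA, pvInnerA_eq]
      rw [pvGroupsC_split (s :: t) [] (Or.inl (by simp))]
      have hlen : ((List.dropWhile (fun s => PySem.Str.len s ≠ 0) (s :: t)).drop 1).length < n := by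
        have h1 : (List.dropWhile (fun s => PySem.Str.len s ≠ 0) (s :: t)).length ≤ (s :: t).length :=
          List.length_dropWhile_le _ _
        simp only [List.length_drop, List.length_cons] at *
        omega
      rw [ih _ hlen _ rfl]
      simp [pvGroupIsect]

-- ===== VERDICT (by name: the statement is the Claim_ definition above) =====
theorem challenge2_spec : Claim_equal_challenge2 := by
  intro l _
  unfold Spec_challenge2 challenge2 challenge2_alt
  rw [pvOuterA_eq]
  have h := pvFoldl_groupStep l [] []
  simp only [List.nil_append] at h
  exact (congrArg (List.map pvGroupIsect) h).symm
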